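-- pv_equiv track=rewrite | github.com/leandro-jr/termo_6 | termo.py | in_used_letters
-- ===== SOURCE A (Python) =====
-- def in_used_letters(letter, used_letters):
--     """
--
--     :param letter: char to be compared with used_letters
--     :param used_letters: list of letters already used by user
--     :return: string with the color to be used
--     """
--     color = "WHITE"
--     for i in used_letters:
--         if len(i) == 4:
--             if i[3].upper() == letter:
--                 return "GREEN"
--         elif len(i) == 3:
--             if i[2].upper() == letter:
--                 color = "YELLOW"
--         elif i.upper() == letter:
--             color = "RED"
--     return color
-- ===== SOURCE B (Python) =====
-- def _is_green(letter, i):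
--     return len(i) == 4 and i[3].upper() == letter
--
-- def _is_yellow(letter, i):
--     return len(i) == 3 and i[2].upper() == letter
--
-- def _is_red(letter, i):
--     return len(i) not in (3, 4) and i.upper() == letter
--
-- def in_used_letters(letter, used_letters):
--     if any(_is_green(letter, i) for i in used_letters):
--         return "GREEN"
--     for i in reversed(used_letters):
--         if _is_yellow(letter, i):
--             return "YELLOW"
--         if _is_red(letter, i):
--             return "RED"
--     return "WHITE"
-- ===== Notes on version B (the rewrite author's own statement) =====
-- stated objective: simpler
-- what changed: Replaces A's single interleaved pass with a mutable color accumulator by a GREEN-existence check plus a reverse scan that returns at the first (i.e. last-in-order) YELLOW/RED match, eliminating the accumulator entirely.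
import Mathlib
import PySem

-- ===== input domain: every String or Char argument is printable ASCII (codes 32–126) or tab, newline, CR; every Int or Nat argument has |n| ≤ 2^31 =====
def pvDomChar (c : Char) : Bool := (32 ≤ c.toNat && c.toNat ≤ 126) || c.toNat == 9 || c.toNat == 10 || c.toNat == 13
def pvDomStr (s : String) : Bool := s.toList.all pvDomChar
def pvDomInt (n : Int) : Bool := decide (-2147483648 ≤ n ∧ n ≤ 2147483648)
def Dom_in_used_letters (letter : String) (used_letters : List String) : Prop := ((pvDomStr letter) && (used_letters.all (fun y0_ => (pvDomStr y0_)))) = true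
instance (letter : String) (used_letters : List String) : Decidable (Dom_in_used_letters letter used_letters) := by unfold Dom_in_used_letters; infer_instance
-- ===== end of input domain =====

-- ===== PORT A =====
-- B decomposes A's single accumulator pass into a GREEN-existence check plus a reverse
-- first-match scan (simpler: no mutable color state).
-- A's loop: early-return GREEN, accumulator for YELLOW/RED (last match wins).
-- i[3]/i[2] are guarded by the length tests, so the 'none' branches are unreachable
-- (they conservatively skip, matching that Python never reaches them).
def inUsedLoopA (letter : String) : List String → String → String
  | [], color => color
  | i :: rest, color =>
    if PySem.Str.len i == 4 then
      if (PySem.Str.pyGet? i 3).map (fun c => String.ofList [PySem.Chars.upperChar c]) == some letter then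
        "GREEN"
      else inUsedLoopA letter rest color
    else if PySem.Str.len i == 3 then
      inUsedLoopA letter rest
        (if (PySem.Str.pyGet? i 2).map (fun c => String.ofList [PySem.Chars.upperChar c]) == some letter then
          "YELLOW" else color)
    else if PySem.Str.upper i == letter then
      inUsedLoopA letter rest "RED"
    else
      inUsedLoopA letter rest color

def in_used_letters (letter : String) (used_letters : List String) : String :=
  inUsedLoopA letter used_letters "WHITE"

-- ===== PORT B =====
def isGreenB (letter : String) (i : String) : Bool :=
  PySem.Str.len i == 4 &&
    (PySem.Str.pyGet? i 3).map (fun c => String.ofList [PySem.Chars.upperChar c]) == some letter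

def isYellowB (letter : String) (i : String) : Bool :=
  PySem.Str.len i == 3 &&
    (PySem.Str.pyGet? i 2).map (fun c => String.ofList [PySem.Chars.upperChar c]) == some letter

def isRedB (letter : String) (i : String) : Bool :=
  !(PySem.Str.len i == 3) && !(PySem.Str.len i == 4) && PySem.Str.upper i == letter

-- the 'for i in reversed(used_letters)' loop of Source B (applied to the reversed list)
def revScanB (letter : String) : List String → String
  | [] => "WHITE"
  | i :: rest =>
    if isYellowB letter i then "YELLOW"
    else if isRedB letter i then "RED"
    else revScanB letter rest

def in_used_letters_alt (letter : String) (used_letters : List String) : String :=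
  if used_letters.any (isGreenB letter) then "GREEN"
  else revScanB letter used_letters.reverse

-- ===== PRECONDITION & SPEC =====
def Spec_in_used_letters (letter : String) (used_letters : List String) (out : String) : Prop := out = in_used_letters_alt letter used_letters
instance (letter : String) (used_letters : List String) (out : String) : Decidable (Spec_in_used_letters letter used_letters out) := by unfold Spec_in_used_letters; infer_instance

-- ===== CLAIM (what is proved, stated in full; the proofs are below) =====
def Claim_equal_in_used_letters : Prop := ∀ (letter : String) (used_letters : List String), Dom_in_used_letters letter used_letters → Spec_in_used_letters letter used_letters (in_used_letters letter used_letters)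

-- ===== LEMMAS AND PROOFS =====

-- how A's loop updates its accumulator on a non-GREEN element, phrased with B's predicates
def updColor (letter : String) (i : String) (c : String) : String :=
  if isYellowB letter i then "YELLOW" else if isRedB letter i then "RED" else c

-- B's reverse scan, generalized over the default value
def revScanD (letter : String) : List String → String → String
  | [], c => c
  | i :: rest, c =>
    if isYellowB letter i then "YELLOW"
    else if isRedB letter i then "RED"
    else revScanD letter rest c

lemma revScanD_white (letter : String) (xs : List String) :
    revScanD letter xs "WHITE" = revScanB letter xs := by
  induction xs with
  | nil => rfl
  | cons i rest ih => simp only [revScanD, revScanB, ih]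

lemma revScanD_append (letter i : String) (ys : List String) (c : String) :
    revScanD letter (ys ++ [i]) c = revScanD letter ys (updColor letter i c) := by
  induction ys with
  | nil => rfl
  | cons j rest ih => simp only [List.cons_append, revScanD, ih]

lemma loopA_green (letter : String) (xs : List String) (c : String)
    (h : xs.any (isGreenB letter) = true) : inUsedLoopA letter xs c = "GREEN" := by
  induction xs generalizing c with
  | nil => simp at h
  | cons i rest ih =>
    simp only [List.any_cons, Bool.or_eq_true] at h
    simp only [inUsedLoopA]
    cases h4 : (PySem.Str.len i == 4) with
    | true =>
      cases hm : ((PySem.Str.pyGet? i 3).map (fun c => String.ofList [PySem.Chars.upperChar c]) == some letter) with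
      | true => simp
      | false =>
        rcases h with hg | hrest
        · rw [isGreenB, h4, hm] at hg; simp at hg
        · simp [ih _ hrest]
    | false =>
      rcases h with hg | hrest
      · rw [isGreenB, h4] at hg; simp at hg
      · cases h3 : (PySem.Str.len i == 3) <;> cases hu : (PySem.Str.upper i == letter) <;>
          simp [ih _ hrest]

lemma loopA_step (letter i : String) (rest : List String) (c : String)
    (hg : isGreenB letter i = false) :
    inUsedLoopA letter (i :: rest) c = inUsedLoopA letter rest (updColor letter i c) := by
  rw [isGreenB] at hg
  cases h4 : (PySem.Str.len i == 4) with
  | true =>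
    have h3 : (PySem.Str.len i == 3) = false := by
      simp only [beq_iff_eq, beq_eq_false_iff_ne, ne_eq] at h4 ⊢; omega
    have hm : ((PySem.Str.pyGet? i 3).map (fun c => String.ofList [PySem.Chars.upperChar c]) == some letter) = false := by
      rw [h4] at hg; simpa using hg
    simp at h4 h3
    simp [inUsedLoopA, updColor, isYellowB, isRedB, h4]
    intro x hx hl
    rw [show PySem.Str.pyGet? i 3 = i.toList[3]? from PySem.List.pyGet?_ofNat' i.toList 3, hx] at hm
    simp [hl] at hm
  | false =>
    cases h3 : (PySem.Str.len i == 3) with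
    | true =>
      simp at h4 h3
      simp [inUsedLoopA, updColor, isYellowB, isRedB, h3]
    | false =>
      cases hu : (PySem.Str.upper i == letter) <;>
        [skip; skip] <;> first
      | (simp at h4 h3 hu; simp [inUsedLoopA, updColor, isYellowB, isRedB, h4, h3, hu])

lemma loopA_no_green (letter : String) (xs : List String) (c : String)
    (h : xs.any (isGreenB letter) = false) :
    inUsedLoopA letter xs c = revScanD letter xs.reverse c := by
  induction xs generalizing c with
  | nil => rfl
  | cons i rest ih =>
    simp only [List.any_cons, Bool.or_eq_false_iff] at h
    obtain ⟨hg, hrest⟩ := h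
    rw [loopA_step letter i rest c hg, ih _ hrest, List.reverse_cons, revScanD_append]

-- ===== VERDICT (by name: the statement is the Claim_ definition above) =====
theorem in_used_letters_spec : Claim_equal_in_used_letters := by
  intro letter used _
  unfold Spec_in_used_letters in_used_letters in_used_letters_alt
  cases h : used.any (isGreenB letter) with
  | true => simp [loopA_green letter used "WHITE" h]
  | false => simp [loopA_no_green letter used "WHITE" h, revScanD_white]
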